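-- pv_equiv track=rewrite | github.com/mhaig/adventofcode | 2021/day12/day12.py | can_explore2
-- ===== SOURCE A (Python) =====
-- from collections import Counter
--
-- def can_explore2(cave, explored):
--     """Test if a cave can be explored with the rules for Part2."""
--     # If the cave is large it can always be explored.
--     if cave.isupper():
--         return True
--
--     # If the cave is small and has not been visited, it can be visited.
--     if cave not in explored:
--         return True
--
--     # If the cave is lower case and has been explored, it can be explored again
--     # if it's the first small cave to be explored twice.
--     counts = Counter(explored)
--     # Put all the lower counts into a list.
--     lower_counts = [v for k,v in counts.items() if k.islower() and v > 1]
--     if not lower_counts: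
--         return True
--
--     return False
-- ===== SOURCE B (Python) =====
-- def can_explore2(cave, explored):
--     """Test if a cave can be explored with the rules for Part2."""
--     if cave.isupper():
--         return True
--     if cave not in explored:
--         return True
--     # Sort the lowercase caves; a repeat exists iff two equal entries are adjacent.
--     lows = sorted(c for c in explored if c.islower())
--     return all(a != b for a, b in zip(lows, lows[1:]))
-- ===== Notes on version B (the rewrite author's own statement) =====
-- stated objective: alternative
-- what changed: Replaces the Counter-table-then-filter duplicate test with sort-then-adjacent-scan: sort the lowercase caves and check that no two neighbours are equal.
import Mathlib
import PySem

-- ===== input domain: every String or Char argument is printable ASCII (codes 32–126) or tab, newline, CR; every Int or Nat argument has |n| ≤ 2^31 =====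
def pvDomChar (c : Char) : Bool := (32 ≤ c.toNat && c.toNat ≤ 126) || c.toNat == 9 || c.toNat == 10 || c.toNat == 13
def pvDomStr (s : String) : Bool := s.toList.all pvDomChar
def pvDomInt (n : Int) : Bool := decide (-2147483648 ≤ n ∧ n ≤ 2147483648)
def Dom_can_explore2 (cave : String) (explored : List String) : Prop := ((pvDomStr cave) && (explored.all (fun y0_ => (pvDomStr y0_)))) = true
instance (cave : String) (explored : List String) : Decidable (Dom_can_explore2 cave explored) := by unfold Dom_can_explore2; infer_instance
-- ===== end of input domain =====

-- B replaces A's Counter-then-filter duplicate test with sort-then-adjacent-scan (alternative algorithm; same behaviour).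

-- ===== PORT A =====
-- str.isupper()/str.islower(): at least one cased character and no cased character of the
-- other case; exact on the ASCII domain, where the cased characters are exactly the letters.
def pyStrIsupper (s : String) : Bool :=
  s.toList.any PySem.Chars.isupper && s.toList.all (fun c => !PySem.Chars.islower c)

def pyStrIslower (s : String) : Bool :=
  s.toList.any PySem.Chars.islower && s.toList.all (fun c => !PySem.Chars.isupper c)

def can_explore2 (cave : String) (explored : List String) : Bool :=
  if pyStrIsupper cave then true
  else if !(explored.contains cave) then true
  else
    let counts := PySem.Dict.counter explored
    let lower_counts :=
      (counts.items.filter (fun kv => pyStrIslower kv.1 && decide ((1 : Int) < kv.2))).map (·.2)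
    if lower_counts.isEmpty then true else false

-- ===== PORT B =====
def can_explore2_alt (cave : String) (explored : List String) : Bool :=
  if pyStrIsupper cave then true
  else if !(explored.contains cave) then true
  else
    let lows := PySem.List.sorted (explored.filter pyStrIslower) (fun x => x) false
    (lows.zip (lows.drop 1)).all (fun p => p.1 != p.2)

-- ===== PRECONDITION & SPEC =====
def Spec_can_explore2 (cave : String) (explored : List String) (out : Bool) : Prop := out = can_explore2_alt cave explored
instance (cave : String) (explored : List String) (out : Bool) : Decidable (Spec_can_explore2 cave explored out) := by unfold Spec_can_explore2; infer_instance

-- ===== CLAIM (what is proved, stated in full; the proofs are below) =====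
def Claim_equal_can_explore2 : Prop := ∀ (cave : String) (explored : List String), Dom_can_explore2 cave explored → Spec_can_explore2 cave explored (can_explore2 cave explored)

-- ===== LEMMAS AND PROOFS =====

-- Adjacent all-distinct over zip with the tail is exactly IsChain (≠).
lemma zip_tail_all_ne_iff (l : List String) :
    ((l.zip (l.drop 1)).all (fun p => p.1 != p.2)) = true ↔ l.IsChain (· ≠ ·) := by
  induction l with
  | nil => simp
  | cons a t ih =>
    cases t with
    | nil => simp
    | cons b t' =>
      simp only [List.drop_one, List.tail_cons, List.zip_cons_cons, List.all_cons,
        List.isChain_cons_cons, Bool.and_eq_true, bne_iff_ne] at *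
      exact and_congr Iff.rfl ih

-- A sorted list (Pairwise ≤) has adjacent-distinct entries iff it is Nodup.
lemma chain_ne_iff_nodup_of_sorted (l : List String)
    (hs : l.Pairwise (fun a b => a ≤ b)) : l.IsChain (· ≠ ·) ↔ l.Nodup := by
  constructor
  · intro hc
    induction l with
    | nil => exact List.nodup_nil
    | cons a t ih =>
      rcases List.pairwise_cons.mp hs with ⟨hle, ht⟩
      refine List.nodup_cons.mpr ⟨?_, ?_⟩
      · cases t with
        | nil => simp
        | cons b t' =>
          rcases List.isChain_cons_cons.mp hc with ⟨hab, _⟩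
          have hab' : a < b := lt_of_le_of_ne (hle b (by simp)) hab
          have hbt : ∀ c ∈ t', b ≤ c := fun c hc' =>
            List.rel_of_pairwise_cons ht hc'
          intro hmem
          rcases List.mem_cons.mp hmem with rfl | hmem'
          · exact absurd rfl hab
          · exact absurd (lt_of_lt_of_le hab' (hbt a hmem')) (lt_irrefl a)
      · exact ih ht hc.tail
  · intro hn
    exact hn.isChain

-- A's lower_counts test: empty iff no lowercase cave occurs more than once.
lemma counterA_true_iff (explored : List String) :
    ((((PySem.Dict.counter explored).items.filter
        (fun kv => pyStrIslower kv.1 && decide ((1 : Int) < kv.2))).map (·.2)).isEmpty = true) ↔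
      ∀ k ∈ explored, pyStrIslower k = true → explored.count k ≤ 1 := by
  rw [List.isEmpty_iff, List.map_eq_nil_iff, List.filter_eq_nil_iff]
  simp only [PySem.Dict.items_counter, List.mem_map]
  constructor
  · intro h k hk hkl
    by_contra hgt
    push Not at hgt
    have hks : k ∈ PySem.Set.ofList explored := (PySem.Set.mem_ofList explored k).mpr hk
    have := h (k, (explored.count k : Int)) ⟨k, hks, rfl⟩
    simp [hkl] at this
    omega
  · rintro h kv ⟨k, hks, rfl⟩
    have hk : k ∈ explored := (PySem.Set.mem_ofList explored k).mp hks
    by_cases hkl : pyStrIslower k = true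
    · have := h k hk hkl
      simp [hkl]; omega
    · simp [hkl]

lemma nodup_filter_iff (explored : List String) :
    (explored.filter pyStrIslower).Nodup ↔
      ∀ k ∈ explored, pyStrIslower k = true → explored.count k ≤ 1 := by
  rw [List.nodup_iff_count_le_one]
  constructor
  · intro h k hk hkl
    have := h k
    rwa [List.count_filter hkl] at this
  · intro h k
    by_cases hkl : pyStrIslower k = true
    · rw [List.count_filter hkl]
      by_cases hk : k ∈ explored
      · exact h k hk hkl
      · simp [List.count_eq_zero_of_not_mem hk]
    · have hnm : k ∉ explored.filter pyStrIslower := by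
        simp [List.mem_filter, hkl]
      simp [List.count_eq_zero_of_not_mem hnm]

-- ===== VERDICT (by name: the statement is the Claim_ definition above) =====
theorem can_explore2_spec : Claim_equal_can_explore2 := by
  intro cave explored _
  unfold Spec_can_explore2 can_explore2 can_explore2_alt
  by_cases h1 : pyStrIsupper cave = true
  · rw [if_pos h1, if_pos h1]
  · rw [if_neg h1, if_neg h1]
    by_cases hm : cave ∈ explored
    · have hg : ¬ ((!explored.contains cave) = true) := by simp [hm]
      rw [if_neg hg, if_neg hg]
      have hA := counterA_true_iff explored
      set lows := PySem.List.sorted (explored.filter pyStrIslower) (fun x => x) false with hlows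
      have hpw : lows.Pairwise (fun a b => a ≤ b) := PySem.List.sorted_pairwise _ _
      have hperm : lows.Perm (explored.filter pyStrIslower) := PySem.List.sorted_perm _ _ _
      have hB' : ((lows.zip (lows.drop 1)).all (fun p => p.1 != p.2)) = true ↔
          ∀ k ∈ explored, pyStrIslower k = true → explored.count k ≤ 1 := by
        rw [zip_tail_all_ne_iff, chain_ne_iff_nodup_of_sorted _ hpw, hperm.nodup_iff,
          nodup_filter_iff]
      show (if ((((PySem.Dict.counter explored).items.filter
          (fun kv => pyStrIslower kv.1 && decide ((1 : Int) < kv.2))).map (·.2)).isEmpty)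
          then true else false) = ((lows.zip (lows.drop 1)).all (fun p => p.1 != p.2))
      by_cases he : ((((PySem.Dict.counter explored).items.filter
          (fun kv => pyStrIslower kv.1 && decide ((1 : Int) < kv.2))).map (·.2)).isEmpty = true)
      · rw [if_pos he]
        exact (hB'.mpr (hA.mp he)).symm
      · rw [if_neg he]
        cases hb : ((lows.zip (lows.drop 1)).all (fun p => p.1 != p.2))
        · rfl
        · exact absurd (hA.mpr (hB'.mp hb)) he
    · have hg : ((!explored.contains cave) = true) := by simp [hm]
      rw [if_pos hg, if_pos hg]
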